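-- pv_equiv track=rewrite | github.com/DoctorLai/ACM | binarysearch/Longest-Interval/Longest-Interval.py | solve
-- ===== SOURCE A (Python) =====
-- def solve(intervals):
--     if not intervals:
--         return 0
--     intervals.sort()
--     start, end = intervals[0]
--     ans = end - start + 1
--     for a, b in intervals[1:]:
--         if a > end:
--             start = a
--         end = max(end, b)
--         ans = max(ans, end - start + 1)
--     return ans
-- ===== SOURCE B (Python) =====
-- def solve(intervals):
--     if not intervals:
--         return 0
--     intervals.sort()
--     (s0, _), rest = intervals[0], intervals[1:]
--     # pass 1: prefix maxima of interval ends
--     M = []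
--     cur = intervals[0][1]
--     for _, b in intervals:
--         cur = max(cur, b)
--         M.append(cur)
--     # pass 2: gap positions: the tail interval's start clears the prefix max before it
--     gaps = [(a, m) for (a, _), m in zip(rest, M) if a > m]
--     # pass 3: component starts and closing prefix maxima, reduced to the best span
--     starts = [s0] + [a for a, _ in gaps]
--     closes = [m for _, m in gaps] + [cur]
--     return max(c - s + 1 for s, c in zip(starts, closes))
-- ===== Notes on version B (the rewrite author's own statement) =====
-- stated objective: alternative
-- what changed: B carries no running (start,end,best) state: it first builds a prefix-maximum array of interval ends, then extracts merged-component boundaries by zipping the tail with that array and filtering starts that clear the preceding prefix max, and finally reduces the zipped (start, close) pairs to the best span.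
import Mathlib
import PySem

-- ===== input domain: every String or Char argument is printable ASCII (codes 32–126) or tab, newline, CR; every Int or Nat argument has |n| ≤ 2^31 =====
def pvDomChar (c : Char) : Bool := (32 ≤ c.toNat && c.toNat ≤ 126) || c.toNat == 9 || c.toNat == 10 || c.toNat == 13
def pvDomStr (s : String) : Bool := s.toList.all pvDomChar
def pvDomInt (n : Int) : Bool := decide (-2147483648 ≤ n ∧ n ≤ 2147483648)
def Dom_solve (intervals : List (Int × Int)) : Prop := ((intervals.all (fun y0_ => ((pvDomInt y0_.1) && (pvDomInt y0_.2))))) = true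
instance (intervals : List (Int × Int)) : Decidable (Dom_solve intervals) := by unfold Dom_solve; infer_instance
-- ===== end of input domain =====

-- B replaces A's single sweep with a running (start, end, best) state by staged passes over
-- different data: a prefix-maximum array of ends, gap pairs extracted by zipping the tail with
-- that array, and a final max-reduction over component spans (alternative decomposition).
-- Both A and B sort the argument list in place in Python; the equivalence proved here is about
-- the return value (the mutation is identical in both).

-- ===== PORT A =====
-- A's loop state: (start, end, ans)
def stepA (st : Int × Int × Int) (p : Int × Int) : Int × Int × Int :=
  let start' := if p.1 > st.2.1 then p.1 else st.1
  let end' := max st.2.1 p.2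
  (start', end', max st.2.2 (end' - start' + 1))

def solve (intervals : List (Int × Int)) : Int :=
  if intervals = [] then 0
  else
    match PySem.List.sorted2 intervals (fun p => p.1) (fun p => p.2) with
    | [] => 0
    | (s0, e0) :: rest =>
      (rest.foldl stepA (s0, e0, e0 - s0 + 1)).2.2

-- ===== PORT B =====
-- pass-1 loop state: (cur, M)
def prefMaxStep (st : Int × List Int) (p : Int × Int) : Int × List Int :=
  (max st.1 p.2, st.2 ++ [max st.1 p.2])

def solve_alt (intervals : List (Int × Int)) : Int :=
  if intervals = [] then 0
  else
    match PySem.List.sorted2 intervals (fun p => p.1) (fun p => p.2) with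
    | [] => 0
    | (s0, e0) :: rest =>
      let st := (((s0, e0) :: rest).foldl prefMaxStep (e0, []))
      let cur := st.1
      let M := st.2
      -- [(a, m) for (a, _), m in zip(rest, M) if a > m]
      let gaps := ((rest.zip M).filter (fun q => q.1.1 > q.2)).map (fun q => (q.1.1, q.2))
      let starts := s0 :: gaps.map (fun q => q.1)
      let closes := gaps.map (fun q => q.2) ++ [cur]
      -- max(c - s + 1 for s, c in zip(starts, closes)); the zip is nonempty by shape
      match (starts.zip closes).map (fun q => q.2 - q.1 + 1) with
      | [] => 0
      | v :: vs => vs.foldl max v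

-- ===== PRECONDITION & SPEC =====
def Spec_solve (intervals : List (Int × Int)) (out : Int) : Prop := out = solve_alt intervals
instance (intervals : List (Int × Int)) (out : Int) : Decidable (Spec_solve intervals out) := by unfold Spec_solve; infer_instance

-- ===== CLAIM (what is proved, stated in full; the proofs are below) =====
def Claim_equal_solve : Prop := ∀ (intervals : List (Int × Int)), Dom_solve intervals → Spec_solve intervals (solve intervals)

-- ===== LEMMAS AND PROOFS =====

-- proof-side recursive characterisations of B's staged data
def curF (c : Int) : List (Int × Int) → Int
  | [] => c
  | p :: ps => curF (max c p.2) ps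

def MseqF (c : Int) : List (Int × Int) → List Int
  | [] => []
  | p :: ps => max c p.2 :: MseqF (max c p.2) ps

def gapsF (c : Int) : List (Int × Int) → List (Int × Int)
  | [] => []
  | p :: ps => if p.1 > c then (p.1, c) :: gapsF (max c p.2) ps else gapsF (max c p.2) ps

def mkPairs (s c : Int) (rest : List (Int × Int)) : List (Int × Int) :=
  (s :: (gapsF c rest).map (fun q => q.1)).zip ((gapsF c rest).map (fun q => q.2) ++ [curF c rest])

def close0 (c : Int) (rest : List (Int × Int)) : Int :=
  match gapsF c rest with
  | [] => curF c rest
  | g :: _ => g.2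

lemma prefMax_char (rest : List (Int × Int)) : ∀ (c : Int) (L : List Int),
    rest.foldl prefMaxStep (c, L) = (curF c rest, L ++ MseqF c rest) := by
  induction rest with
  | nil => intro c L; simp [curF, MseqF]
  | cons p ps ih =>
    intro c L
    simp [prefMaxStep, curF, MseqF, ih]

lemma zipfilter_char (rest : List (Int × Int)) : ∀ (c : Int),
    ((rest.zip (c :: MseqF c rest)).filter (fun q => q.1.1 > q.2)).map (fun q => (q.1.1, q.2))
      = gapsF c rest := by
  induction rest with
  | nil => intro c; simp [gapsF]
  | cons p ps ih =>
    intro c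
    by_cases h : p.1 > c <;> simp [MseqF, gapsF, h, ih]

lemma close0_ge (rest : List (Int × Int)) : ∀ c : Int, c ≤ close0 c rest := by
  induction rest with
  | nil => intro c; simp [close0, gapsF, curF]
  | cons p ps ih =>
    intro c
    by_cases h : p.1 > c
    · simp [close0, gapsF, h]
    · have := ih (max c p.2)
      cases hgf : gapsF (max c p.2) ps <;>
        simp [close0, gapsF, h, curF, hgf] at this ⊢ <;> omega

lemma mkPairs_head (s c : Int) (rest : List (Int × Int)) :
    ∃ tl, mkPairs s c rest = (s, close0 c rest) :: tl := by
  cases h : gapsF c rest with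
  | nil => exact ⟨[], by simp [mkPairs, close0, h]⟩
  | cons g gs =>
    exact ⟨(g.1 :: gs.map (fun q => q.1)).zip (gs.map (fun q => q.2) ++ [curF c rest]),
      by simp [mkPairs, close0, h]⟩

-- folding max over spans: a base bounded by the first span is absorbed
lemma foldmax_absorb (qs : List (Int × Int)) (a x : Int) (q : Int × Int)
    (h : x ≤ q.2 - q.1 + 1) :
    (q :: qs).foldl (fun a q => max a (q.2 - q.1 + 1)) (max a x)
      = (q :: qs).foldl (fun a q => max a (q.2 - q.1 + 1)) a := by
  simp only [List.foldl_cons]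
  congr 1
  omega

-- main invariant: A's running answer equals the max-reduction over B's component pairs
lemma mainInv (rest : List (Int × Int)) : ∀ (s c ans : Int), c - s + 1 ≤ ans →
    (rest.foldl stepA (s, c, ans)).2.2
      = (mkPairs s c rest).foldl (fun a q => max a (q.2 - q.1 + 1)) ans := by
  induction rest with
  | nil =>
    intro s c ans h
    simp [mkPairs, gapsF, curF]
    omega
  | cons p ps ih =>
    intro s c ans h
    by_cases hg : p.1 > c
    · have hA : stepA (s, c, ans) p = (p.1, max c p.2, max ans (max c p.2 - p.1 + 1)) := by
        simp [stepA, hg]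
      have hmk : mkPairs s c (p :: ps) = (s, c) :: mkPairs p.1 (max c p.2) ps := by
        simp [mkPairs, gapsF, hg, curF]
      obtain ⟨tl, htl⟩ := mkPairs_head p.1 (max c p.2) ps
      have hcl := close0_ge ps (max c p.2)
      rw [List.foldl_cons, hA, hmk, List.foldl_cons]
      rw [ih _ _ _ (by omega)]
      have h1 : max ans (c - s + 1) = ans := by omega
      rw [h1, htl, foldmax_absorb _ _ _ _ (by simp; omega)]
    · have hA : stepA (s, c, ans) p = (s, max c p.2, max ans (max c p.2 - s + 1)) := by
        simp [stepA, hg]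
      have hmk : mkPairs s c (p :: ps) = mkPairs s (max c p.2) ps := by
        simp [mkPairs, gapsF, hg, curF]
      obtain ⟨tl, htl⟩ := mkPairs_head s (max c p.2) ps
      have hcl := close0_ge ps (max c p.2)
      rw [List.foldl_cons, hA, hmk]
      rw [ih _ _ _ (by omega)]
      rw [htl, foldmax_absorb _ _ _ _ (by simp; omega)]

-- map-then-fold of spans is the fold over pairs
lemma foldl_map_span (qs : List (Int × Int)) (a : Int) :
    (qs.map (fun q => q.2 - q.1 + 1)).foldl max a
      = qs.foldl (fun a q => max a (q.2 - q.1 + 1)) a := by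
  rw [List.foldl_map]

-- ===== VERDICT (by name: the statement is the Claim_ definition above) =====
theorem solve_spec : Claim_equal_solve := by
  intro intervals _
  unfold Spec_solve solve solve_alt
  by_cases hnil : intervals = []
  · simp [hnil]
  · simp only [if_neg hnil]
    cases hs : PySem.List.sorted2 intervals (fun p => p.1) (fun p => p.2) with
    | nil => rfl
    | cons hd rest =>
      obtain ⟨s0, e0⟩ := hd
      -- identify B's staged data with the recursive characterisations
      have hM : ((s0, e0) :: rest).foldl prefMaxStep (e0, [])
          = (curF e0 rest, e0 :: MseqF e0 rest) := by
        rw [List.foldl_cons]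
        simp only [prefMaxStep, max_self, List.nil_append]
        exact prefMax_char rest e0 [e0]
      simp only [hM]
      rw [show ((rest.zip (e0 :: MseqF e0 rest)).filter (fun q => q.1.1 > q.2)).map
            (fun q => (q.1.1, q.2)) = gapsF e0 rest from zipfilter_char rest e0]
      have hpairs : (((s0 :: (gapsF e0 rest).map (fun q => q.1)).zip
            ((gapsF e0 rest).map (fun q => q.2) ++ [curF e0 rest]))) = mkPairs s0 e0 rest := rfl
      rw [hpairs]
      obtain ⟨tl, htl⟩ := mkPairs_head s0 e0 rest
      have hcl := close0_ge rest e0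
      rw [mainInv rest s0 e0 (e0 - s0 + 1) (le_refl _), htl]
      simp only [List.map_cons, List.foldl_cons]
      rw [foldl_map_span]
      congr 1
      omega
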